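-- pv_equiv track=rewrite | github.com/loudringphone/unsw_9021_exam_samples | 21T3/21T3Q8.py | is_heterosquare
-- ===== SOURCE A (Python) =====
-- from collections import defaultdict
--
-- def is_heterosquare(square):
--     '''
--     A heterosquare of order n is an arrangement of the integers 1 to n**2 in a square,
--     such that the rows, columns, and diagonals all sum to DIFFERENT values.
--     In contrast, magic squares have all these sums equal.
--
--     Conjunctions of inputs will be tested, so hard coding will not help.
--
--     >>> is_heterosquare([[1, 2, 3],\
--                          [8, 9, 4],\
--                          [7, 6, 5]])
--     True
--     >>> is_heterosquare([[1, 2, 3],\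
--                          [9, 8, 4],\
--                          [7, 6, 5]])
--     False
--     >>> is_heterosquare([[2, 1, 3, 4],\
--                          [5, 6, 7, 8],\
--                          [9, 10, 11, 12],\
--                          [13, 14, 15, 16]])
--     True
--     >>> is_heterosquare([[1, 2, 3, 4],\
--                          [5, 6, 7, 8],\
--                          [9, 10, 11, 12],\
--                          [13, 14, 15, 16]])
--     False
--     '''
--     height = len(square)
--     if not height: return False
--     width = len(square[0])
--     if not width: return False
--     values = []
--     for row in square:
--         values.append(sum(row))
--     for col in list(zip(*square)):
--         values.append(sum(col))
--     val = 0
--     for j in range(width):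
--         val += square[j][j]
--     values.append(val)
--     val = 0; i = 0
--     for j in range(width-1, -1, -1):
--         val += square[i][j]
--         i += 1
--     values.append(val)
--     counter = defaultdict(int)
--     for val in values:
--         counter[val] += 1
--         if counter[val] > 1:
--             return False
--     return True
-- ===== SOURCE B (Python) =====
-- def is_heterosquare(square):
--     if not square:
--         return False
--     width = len(square[0])
--     if not width:
--         return False
--     sums = [sum(row) for row in square]
--     sums += [sum(col) for col in zip(*square)]
--     sums.append(sum(square[j][j] for j in range(width)))
--     sums.append(sum(square[i][width - 1 - i] for i in range(width)))
--     s = sorted(sums)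
--     return all(a != b for a, b in zip(s, s[1:]))
-- ===== Notes on version B (the rewrite author's own statement) =====
-- stated objective: simpler
-- what changed: B collects the same row/column/diagonal sums with comprehensions but detects duplicate sums by sorting the list and scanning adjacent pairs, instead of A's running defaultdict counter with early return.
import Mathlib
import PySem

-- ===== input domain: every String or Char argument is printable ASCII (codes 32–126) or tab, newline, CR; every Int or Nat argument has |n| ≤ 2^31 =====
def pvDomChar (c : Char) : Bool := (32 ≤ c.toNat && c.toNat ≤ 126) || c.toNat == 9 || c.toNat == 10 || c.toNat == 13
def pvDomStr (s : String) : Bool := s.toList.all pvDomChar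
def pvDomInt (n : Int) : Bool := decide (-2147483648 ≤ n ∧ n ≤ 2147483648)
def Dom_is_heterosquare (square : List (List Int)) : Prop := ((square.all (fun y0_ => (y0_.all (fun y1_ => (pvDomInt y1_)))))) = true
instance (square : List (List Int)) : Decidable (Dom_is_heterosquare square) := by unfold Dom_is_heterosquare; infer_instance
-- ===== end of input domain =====

-- B replaces A's running defaultdict counter with sort-then-adjacent-scan duplicate detection
-- (same sums collected; equivalence of the return value is what is proved).

-- ===== PORT A =====
-- zip(*square): column k exists for k below the minimum row length.
def pvZipStar (rows : List (List Int)) : List (List Int) :=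
  match (rows.map (·.length)).min? with
  | none => []
  | some m => (List.range m).map (fun k => rows.map (fun r => r.getD k 0))

-- the 'for val in values: counter[val] += 1; if counter[val] > 1: return False' loop
def pvCounterLoop : List Int → PySem.Dict Int Int → Bool
  | [], _ => true
  | v :: rest, d =>
      let d' := d.insert v (d.getD v 0 + 1)
      if d'.getD v 0 > 1 then false else pvCounterLoop rest d'

def is_heterosquare (square : List (List Int)) : Bool :=
  if square.length = 0 then false else
  let width := (square.headD []).length
  if width = 0 then false else
  let values := square.map (fun row => row.sum)
  let values := values ++ (pvZipStar square).map (fun col => col.sum)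
  let diag := (List.range width).foldl
      (fun val j => val + PySem.List.pyGetD (square.getD j []) (j : Int) 0) 0
  let values := values ++ [diag]
  let anti := ((PySem.List.pyRange ((width : Int) - 1) (-1) (-1)).foldl
      (fun (st : Int × Nat) j => (st.1 + PySem.List.pyGetD (square.getD st.2 []) j 0, st.2 + 1))
      (0, 0)).1
  let values := values ++ [anti]
  pvCounterLoop values PySem.Dict.empty

-- ===== PORT B =====
def is_heterosquare_alt (square : List (List Int)) : Bool :=
  if square.length = 0 then false else
  let width := (square.headD []).length
  if width = 0 then false else
  let sums := square.map (fun row => row.sum)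
      ++ (pvZipStar square).map (fun col => col.sum)
      ++ [((List.range width).map
            (fun j => PySem.List.pyGetD (square.getD j []) (j : Int) 0)).sum]
      ++ [((List.range width).map
            (fun i => PySem.List.pyGetD (square.getD i []) ((width : Int) - 1 - i) 0)).sum]
  let s := PySem.List.sorted sums (fun x => x) false
  (s.zip s.tail).all (fun p => p.1 != p.2)

-- ===== PRECONDITION & SPEC =====
-- Pre_ excludes exactly the inputs on which A raises IndexError while reading a diagonal
-- entry (too few rows, or a row too short at its diagonal/anti-diagonal position); B raises there too.
def Pre_is_heterosquare (square : List (List Int)) : Prop :=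
  square.length = 0 ∨ (square.headD []).length = 0 ∨
  ((square.headD []).length ≤ square.length ∧
   ∀ i ∈ List.range (square.headD []).length,
     i < (square.getD i []).length ∧
     (square.headD []).length - 1 - i < (square.getD i []).length)
instance (square : List (List Int)) : Decidable (Pre_is_heterosquare square) := by
  unfold Pre_is_heterosquare; infer_instance

def pvWitness_is_heterosquare : List (List Int) := [[1, 2, 3], [8, 9, 4], [7, 6, 5]]

def Spec_is_heterosquare (square : List (List Int)) (out : Bool) : Prop := out = is_heterosquare_alt square
instance (square : List (List Int)) (out : Bool) : Decidable (Spec_is_heterosquare square out) := by unfold Spec_is_heterosquare; infer_instance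

-- ===== CLAIM (what is proved, stated in full; the proofs are below) =====
def Claim_equal_is_heterosquare : Prop := ∀ (square : List (List Int)), Dom_is_heterosquare square → Pre_is_heterosquare square → Spec_is_heterosquare square (is_heterosquare square)

-- ===== LEMMAS AND PROOFS =====

-- A's counter loop returns true iff the values are distinct and none was already counted.
lemma pvCounterLoop_eq_true_iff (vs : List Int) : ∀ (d : PySem.Dict Int Int),
    (∀ v, 0 ≤ d.getD v 0) →
    (pvCounterLoop vs d = true ↔ vs.Nodup ∧ ∀ v ∈ vs, d.getD v 0 = 0) := by
  induction vs with
  | nil => intro d _; simp [pvCounterLoop]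
  | cons v rest ih =>
    intro d hd
    simp only [pvCounterLoop]
    rw [PySem.Dict.getD_insert_self]
    by_cases hv : d.getD v 0 = 0
    · have hle : ¬ d.getD v 0 + 1 > 1 := by omega
      rw [if_neg hle, ih _ (by
        intro u
        rw [PySem.Dict.getD_insert]
        split_ifs with h
        · omega
        · exact hd u)]
      constructor
      · rintro ⟨hnd, hall⟩
        have hnotmem : v ∉ rest := by
          intro hm
          have := hall v hm
          rw [PySem.Dict.getD_insert_self] at this
          omega
        refine ⟨List.nodup_cons.2 ⟨hnotmem, hnd⟩, ?_⟩
        intro u hu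
        rcases List.mem_cons.1 hu with rfl | hu
        · exact hv
        · have := hall u hu
          rw [PySem.Dict.getD_insert] at this
          split_ifs at this with h
          · omega
          · exact this
      · rintro ⟨hnd, hall⟩
        rcases List.nodup_cons.1 hnd with ⟨hnm, hnd'⟩
        refine ⟨hnd', ?_⟩
        intro u hu
        rw [PySem.Dict.getD_insert]
        split_ifs with h
        · exact absurd (h ▸ hu) hnm
        · exact hall u (List.mem_cons_of_mem _ hu)
    · have hgt : d.getD v 0 + 1 > 1 := by have := hd v; omega
      rw [if_pos hgt]
      simp only [Bool.false_eq_true, false_iff, not_and]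
      intro _ hall
      exact hv (hall v (List.mem_cons_self))

-- adjacent all-different scan checks exactly chained adjacent distinctness
lemma pvZipAll_ne_iff (s : List Int) :
    ((s.zip s.tail).all (fun p => p.1 != p.2) = true) ↔ List.IsChain (· ≠ ·) s := by
  induction s with
  | nil => simp
  | cons a t ih =>
    cases t with
    | nil => simp
    | cons b u =>
      simp only [List.tail_cons, List.zip_cons_cons, List.all_cons, Bool.and_eq_true,
        bne_iff_ne, ne_eq, List.isChain_cons_cons]
      rw [← ih]
      simp [List.tail_cons]

-- on a ≤-sorted list, adjacent all-different ⇔ Nodup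
lemma pvAdj_sorted_iff_nodup (s : List Int) (hs : s.Pairwise (· ≤ ·)) :
    ((s.zip s.tail).all (fun p => p.1 != p.2) = true) ↔ s.Nodup := by
  rw [pvZipAll_ne_iff]
  constructor
  · intro hc
    have hlt : List.IsChain (· < ·) s := by
      have hchain : List.IsChain (· ≤ ·) s := List.isChain_iff_pairwise.mpr hs
      clear hs
      induction s with
      | nil => exact List.IsChain.nil
      | cons a t ih2 =>
        cases t with
        | nil => exact List.isChain_singleton a
        | cons b u =>
          rcases List.isChain_cons_cons.1 hchain with ⟨hab, hch⟩
          rcases List.isChain_cons_cons.1 hc with ⟨hne, hc'⟩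
          exact List.isChain_cons_cons.2 ⟨lt_of_le_of_ne hab hne, ih2 hc' hch⟩
    exact (List.isChain_iff_pairwise.1 hlt).nodup
  · intro hnd
    have hlt : s.Pairwise (· < ·) :=
      (List.Pairwise.and hs hnd).imp (fun h => lt_of_le_of_ne h.1 h.2)
    exact (hlt.imp (fun h => ne_of_lt h)).isChain

-- B's sorted-scan check decides Nodup of the collected sums
lemma pvSortScan_iff_nodup (xs : List Int) :
    (((PySem.List.sorted xs (fun x => x) false).zip
        (PySem.List.sorted xs (fun x => x) false).tail).all (fun p => p.1 != p.2) = true)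
      ↔ xs.Nodup := by
  rw [pvAdj_sorted_iff_nodup _ (by
        simpa using PySem.List.sorted_pairwise xs (fun x => x))]
  exact (PySem.List.sorted_perm xs (fun x => x) false).nodup_iff

-- the two duplicate detectors agree on any list of sums
lemma pvMain (xs : List Int) :
    pvCounterLoop xs PySem.Dict.empty
      = ((PySem.List.sorted xs (fun x => x) false).zip
          (PySem.List.sorted xs (fun x => x) false).tail).all (fun p => p.1 != p.2) := by
  have h1 := pvCounterLoop_eq_true_iff xs PySem.Dict.empty
    (by intro v; simp [PySem.Dict.getD_empty])
  have h2 := pvSortScan_iff_nodup xs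
  apply Bool.eq_iff_iff.mpr
  rw [h1, h2]
  simp [PySem.Dict.getD_empty]

-- the paired fold A uses for the anti-diagonal, characterised
lemma pvFoldPair (f : Nat → Int → Int) (l : List Int) : ∀ (v0 : Int) (i0 : Nat),
    (l.foldl (fun (st : Int × Nat) j => (st.1 + f st.2 j, st.2 + 1)) (v0, i0)).1
      = v0 + ((l.zipIdx i0).map (fun p => f p.2 p.1)).sum := by
  induction l with
  | nil => intro v0 i0; simp
  | cons x t ih =>
    intro v0 i0
    simp only [List.foldl_cons, List.zipIdx_cons, List.map_cons, List.sum_cons]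
    rw [ih]
    ring

lemma pvZipIdxRange' : ∀ (n s : Nat),
    (List.range' s n).zipIdx s = (List.range' s n).map (fun k => (k, k)) := by
  intro n
  induction n with
  | zero => intro s; simp
  | succ m ih => intro s; simp [List.range'_succ, ih (s + 1)]

-- A's diagonal fold is B's map-sum
lemma pvDiagFold (f : Nat → Int) (w : Nat) :
    (List.range w).foldl (fun val j => val + f j) 0 = ((List.range w).map f).sum := by
  induction w with
  | zero => simp
  | succ n ih => simp [List.range_succ, ih]

-- A's anti-diagonal countdown fold is B's map-sum (general form)
lemma pvAntiFoldGen (g : Nat → Int → Int) (w : Nat) :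
    ((PySem.List.pyRange ((w : Int) - 1) (-1) (-1)).foldl
        (fun (st : Int × Nat) j => (st.1 + g st.2 j, st.2 + 1)) (0, 0)).1
      = ((List.range w).map (fun i => g i ((w : Int) - 1 - i))).sum := by
  rw [pvFoldPair, PySem.List.pyRange_neg_one]
  have hlen : ((w : Int) - 1 - (-1)).toNat = w := by omega
  rw [hlen, zero_add]
  congr 1
  rw [List.zipIdx_map, List.range_eq_range', pvZipIdxRange' w 0]
  simp [List.map_map, Function.comp_def]

-- the instance of pvAntiFoldGen the goal needs (spelled out so simp can match it first-order)
lemma pvAntiFold (square : List (List Int)) (w : Nat) :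
    ((PySem.List.pyRange ((w : Int) - 1) (-1) (-1)).foldl
        (fun (st : Int × Nat) j =>
          (st.1 + PySem.List.pyGetD (square.getD st.2 []) j 0, st.2 + 1)) (0, 0)).1
      = ((List.range w).map
          (fun i => PySem.List.pyGetD (square.getD i []) ((w : Int) - 1 - i) 0)).sum :=
  pvAntiFoldGen (fun i j => PySem.List.pyGetD (square.getD i []) j 0) w

-- ===== VERDICT (by name: the statement is the Claim_ definition above) =====
theorem is_heterosquare_spec : Claim_equal_is_heterosquare := by
  intro square _ _
  unfold Spec_is_heterosquare is_heterosquare is_heterosquare_alt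
  by_cases h1 : square.length = 0
  · simp [h1]
  · rw [if_neg h1, if_neg h1]
    by_cases h2 : (square.headD []).length = 0
    · rw [if_pos h2, if_pos h2]
    · rw [if_neg h2, if_neg h2]
      simp only [pvDiagFold, pvAntiFold, pvMain, List.append_assoc]
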